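-- pv_equiv track=rewrite | github.com/ZBNomek/Python_ProgramProblems | E_Arreglos/E_29.py | ordenar_elem
-- ===== SOURCE A (Python) =====
-- def ordenar_elem(arreglo):
--     arreglo_ordenado: list = [None]*len(arreglo)
--     for i in arreglo:
--         t = 0
--         for e in arreglo:
--             if i <= e:
--                 t += 1
--             else:
--                 pass
--         arreglo_ordenado[-t] = i
--     return arreglo_ordenado
-- ===== SOURCE B (Python) =====
-- def ordenar_elem(arreglo):
--     return sorted(arreglo)
-- ===== Notes on version B (the rewrite author's own statement) =====
-- stated objective: idiomatic
-- what changed: A sorts by counting, for each element, how many elements are >= it with a nested scan and scattering it at index n-count; B just sorts the list once with the built-in sort (O(n log n) vs O(n^2), though a timing run's duplicate-heavy inputs fall outside Pre_). Pre_ excludes lists with duplicate values, on which A's equal elements collide into one output slot and the remaining slots are left as None, so A's result is not a list of ints.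
-- outside the precondition, e.g. on ordenar_elem([2, 2, 1]): A returns [1, 2, None], B returns [1, 2, 2]
import Mathlib
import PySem

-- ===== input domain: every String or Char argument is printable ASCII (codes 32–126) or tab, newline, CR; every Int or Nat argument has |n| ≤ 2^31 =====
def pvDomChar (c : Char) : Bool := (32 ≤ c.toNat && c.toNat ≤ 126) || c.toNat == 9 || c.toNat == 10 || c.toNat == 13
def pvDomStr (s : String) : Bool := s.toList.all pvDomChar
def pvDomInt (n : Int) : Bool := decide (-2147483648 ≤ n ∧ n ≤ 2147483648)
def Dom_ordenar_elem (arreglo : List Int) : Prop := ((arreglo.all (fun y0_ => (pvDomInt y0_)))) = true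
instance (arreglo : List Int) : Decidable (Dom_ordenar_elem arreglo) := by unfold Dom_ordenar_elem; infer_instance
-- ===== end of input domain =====

-- B replaces A's quadratic count-and-scatter sort by a single built-in sort; proved equal on duplicate-free lists (Pre_).


-- ===== PORT A =====
-- Python builds `[None]*len(arreglo)` and assigns `arreglo_ordenado[-t] = i`; the working
-- list is `List (Option Int)` and the final `.map (·.getD 0)` realises it as a `List Int`
-- (under Pre_ every slot holds `some _`, so the default is never used).
def ordenar_elem (arreglo : List Int) : List Int :=
  (arreglo.foldl
    (fun acc i =>
      let t : Int := arreglo.foldl (fun t e => if i ≤ e then t + 1 else t) 0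
      PySem.List.pySetD acc (-t) (some i))
    (List.replicate arreglo.length (none : Option Int))).map (fun o => o.getD 0)

-- ===== PORT B =====
def ordenar_elem_alt (arreglo : List Int) : List Int :=
  PySem.List.sorted arreglo (fun x => x) false

-- ===== PRECONDITION & SPEC =====
-- Pre_ excludes lists with duplicate values: there A's equal elements collide into one
-- output slot and the remaining slots keep their initial None, so A's return value is not
-- a list of ints (None among ints).
def Pre_ordenar_elem (arreglo : List Int) : Prop := arreglo.Nodup
instance (arreglo : List Int) : Decidable (Pre_ordenar_elem arreglo) := by unfold Pre_ordenar_elem; infer_instance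

def pvWitness_ordenar_elem : List Int := [3, 1, 2]

def Spec_ordenar_elem (arreglo : List Int) (out : List Int) : Prop := out = ordenar_elem_alt arreglo
instance (arreglo : List Int) (out : List Int) : Decidable (Spec_ordenar_elem arreglo out) := by unfold Spec_ordenar_elem; infer_instance

-- ===== CLAIM (what is proved, stated in full; the proofs are below) =====
def Claim_equal_ordenar_elem : Prop := ∀ (arreglo : List Int), Dom_ordenar_elem arreglo → Pre_ordenar_elem arreglo → Spec_ordenar_elem arreglo (ordenar_elem arreglo)

-- ===== LEMMAS AND PROOFS =====

-- how many elements of `l` are ≥ x (the Python counter `t`)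
def pvCnt (l : List Int) (x : Int) : Nat := l.countP (fun e => decide (x ≤ e))
-- the slot A writes x into: n - t
def pvPos (l : List Int) (x : Int) : Nat := l.length - pvCnt l x
-- the idealised scatter loop (A's loop after both rewrites below)
def pvScatter (l : List Int) (xs : List Int) (acc : List (Option Int)) : List (Option Int) :=
  xs.foldl (fun acc i => acc.set (pvPos l i) (some i)) acc

theorem pvCnt_pos {l : List Int} {x : Int} (hx : x ∈ l) : 1 ≤ pvCnt l x := by
  have : 0 < pvCnt l x := List.countP_pos_iff.mpr ⟨x, hx, by simp⟩
  omega

theorem pvCnt_le {l : List Int} (x : Int) : pvCnt l x ≤ l.length := List.countP_le_length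

theorem pvPos_lt {l : List Int} {x : Int} (hx : x ∈ l) : pvPos l x < l.length := by
  have h1 := pvCnt_pos hx
  have h2 := pvCnt_le (l := l) x
  have h3 : 0 < l.length := List.length_pos_of_mem hx
  unfold pvPos; omega

-- the inner Python loop is the count
theorem pvInner_eq_cnt (l : List Int) (x : Int) :
    l.foldl (fun t e => if x ≤ e then t + 1 else t) (0 : Int) = (pvCnt l x : Int) := by
  have := PySem.List.foldl_ite_add_one (l := l) (p := fun e => x ≤ e) (a := (0 : Int))
  simpa [pvCnt] using this

-- negative-index assignment at -t is `set (n - t)` when 1 ≤ t ≤ n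
theorem pvSetD_neg (acc : List (Option Int)) (t : Nat) (v : Option Int)
    (h1 : 1 ≤ t) (h2 : t ≤ acc.length) :
    PySem.List.pySetD acc (-(t : Int)) v = acc.set (acc.length - t) v := by
  simp only [PySem.List.pySetD, PySem.List.pySet?, PySem.List.pyIdx?]
  have hneg : ¬ (0 : Int) ≤ -(t : Int) := by omega
  have hge : -(acc.length : Int) ≤ -(t : Int) := by omega
  have ht : t ≠ 0 := by omega
  simp [hge, ht]

theorem pvScatter_length (l xs : List Int) (acc : List (Option Int)) :
    (pvScatter l xs acc).length = acc.length := by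
  induction xs generalizing acc with
  | nil => rfl
  | cons x xs ih => simp [pvScatter, List.foldl_cons] at *; simp [ih]

-- A's loop equals the idealised scatter loop on accumulators of full length
theorem pvLoop_eq_scatter (l : List Int) :
    ∀ (xs : List Int) (acc : List (Option Int)), acc.length = l.length →
    (∀ i ∈ xs, i ∈ l) →
    xs.foldl
      (fun acc i =>
        let t : Int := l.foldl (fun t e => if i ≤ e then t + 1 else t) 0
        PySem.List.pySetD acc (-t) (some i)) acc
      = pvScatter l xs acc := by
  intro xs
  induction xs with
  | nil => intro acc _ _; rfl
  | cons x xs ih =>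
    intro acc hlen hmem
    have hx : x ∈ l := hmem x (by simp)
    have step :
        (let t : Int := l.foldl (fun t e => if x ≤ e then t + 1 else t) 0
         PySem.List.pySetD acc (-t) (some x)) = acc.set (pvPos l x) (some x) := by
      simp only [pvInner_eq_cnt]
      rw [pvSetD_neg acc (pvCnt l x) (some x) (pvCnt_pos hx) (by rw [hlen]; exact pvCnt_le x)]
      rw [hlen]; rfl
    simp only [List.foldl_cons, step]
    rw [ih (acc.set (pvPos l x) (some x)) (by simpa using hlen)
        (fun i hi => hmem i (by simp [hi]))]
    rfl

-- slots nobody writes keep their value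
theorem pvScatter_untouched (l : List Int) :
    ∀ (xs : List Int) (acc : List (Option Int)) (k : Nat),
      (∀ j ∈ xs, pvPos l j ≠ k) → (pvScatter l xs acc)[k]? = acc[k]? := by
  intro xs
  induction xs with
  | nil => intro acc k _; rfl
  | cons x xs ih =>
    intro acc k h
    have hx : pvPos l x ≠ k := h x (by simp)
    simp only [pvScatter, List.foldl_cons]
    rw [show (xs.foldl (fun acc i => acc.set (pvPos l i) (some i))
          (acc.set (pvPos l x) (some x))) = pvScatter l xs (acc.set (pvPos l x) (some x)) from rfl]
    rw [ih _ k (fun j hj => h j (by simp [hj]))]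
    exact List.getElem?_set_ne hx

-- every written slot holds its writer, provided writers hit pairwise-distinct slots
theorem pvScatter_hit (l : List Int) :
    ∀ (xs : List Int) (acc : List (Option Int)),
      xs.Pairwise (fun a b => pvPos l a ≠ pvPos l b) →
      (∀ j ∈ xs, pvPos l j < acc.length) →
      ∀ i ∈ xs, (pvScatter l xs acc)[pvPos l i]? = some (some i) := by
  intro xs
  induction xs with
  | nil => intro acc _ _ i hi; simp at hi
  | cons x xs ih =>
    intro acc hpw hlt i hi
    have hpw' := (List.pairwise_cons.mp hpw)
    simp only [pvScatter, List.foldl_cons]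
    rw [show (xs.foldl (fun acc i => acc.set (pvPos l i) (some i))
          (acc.set (pvPos l x) (some x))) = pvScatter l xs (acc.set (pvPos l x) (some x)) from rfl]
    rcases List.mem_cons.mp hi with rfl | hi'
    · rw [pvScatter_untouched l xs _ (pvPos l i) (fun j hj => (hpw'.1 j hj).symm)]
      have : pvPos l i < acc.length := hlt i (by simp)
      simp [this]
    · exact ih _ hpw'.2 (fun j hj => by simpa using hlt j (by simp [hj])) i hi'

-- counting ≥-elements in a strictly increasing list: position k has exactly n-k of them
theorem pvCnt_sorted (S : List Int) (hS : S.Pairwise (· < ·)) (k : Nat) (hk : k < S.length) :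
    pvCnt S (S[k]) = S.length - k := by
  have hsplit : S = S.take k ++ S.drop k := (List.take_append_drop k S).symm
  have hpair := List.pairwise_iff_getElem.mp hS
  have htake : ∀ e ∈ S.take k, ¬ (S[k] ≤ e) := by
    intro e he
    obtain ⟨j, hj, rfl⟩ := List.getElem_of_mem he
    have hjk : j < k := lt_of_lt_of_le hj (by simp [List.length_take])
    have hjS : j < S.length := lt_of_lt_of_le hjk (le_of_lt hk)
    have : (S.take k)[j] = S[j] := List.getElem_take
    rw [this]
    exact not_le.mpr (hpair j k hjS hk hjk)
  have hdrop : ∀ e ∈ S.drop k, S[k] ≤ e := by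
    intro e he
    obtain ⟨j, hj, rfl⟩ := List.getElem_of_mem he
    have hjS : k + j < S.length := by
      have := hj; simp [List.length_drop] at this; omega
    have : (S.drop k)[j] = S[k + j] := List.getElem_drop
    rw [this]
    rcases Nat.eq_zero_or_pos j with rfl | hpos
    · simp
    · exact le_of_lt (hpair k (k + j) hk hjS (by omega))
  obtain ⟨x, hx⟩ : ∃ x, S[k] = x := ⟨_, rfl⟩
  rw [hx] at htake hdrop
  show List.countP (fun e => decide (S[k] ≤ e)) S = S.length - k
  rw [hx]
  conv_lhs => rw [hsplit]
  rw [List.countP_append]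
  have h1 : (S.take k).countP (fun e => decide (x ≤ e)) = 0 := by
    rw [List.countP_eq_zero]
    intro e he; simpa using htake e he
  have h2 : (S.drop k).countP (fun e => decide (x ≤ e)) = (S.drop k).length := by
    rw [List.countP_eq_length]
    intro e he; simpa using hdrop e he
  rw [h1, h2, List.length_drop]
  omega

-- ===== VERDICT (by name: the statement is the Claim_ definition above) =====
theorem ordenar_elem_spec : Claim_equal_ordenar_elem := by
  intro arreglo _ hnd
  unfold Spec_ordenar_elem ordenar_elem ordenar_elem_alt
  set S := PySem.List.sorted arreglo (fun x => x) false with hSdef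
  have hperm : S.Perm arreglo := PySem.List.sorted_perm arreglo (fun x => x) false
  have hSnd : S.Nodup := hperm.nodup_iff.mpr hnd
  have hSle : S.Pairwise (· ≤ ·) := by
    simpa using PySem.List.sorted_pairwise (xs := arreglo) (key := fun x : Int => x)
  have hSlt : S.Pairwise (· < ·) := by
    have := List.Pairwise.and hSle (List.nodup_iff_pairwise_ne.mp hSnd)
    exact this.imp (fun h => lt_of_le_of_ne h.1 h.2)
  have hlenS : S.length = arreglo.length := hperm.length_eq
  have hcnt_eq : ∀ x, pvCnt arreglo x = pvCnt S x := fun x => (hperm.countP_eq _).symm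
  have hposS : ∀ (k : Nat) (hk : k < S.length), pvPos arreglo (S[k]) = k := by
    intro k hk
    unfold pvPos
    rw [hcnt_eq, pvCnt_sorted S hSlt k hk, hlenS]
    omega
  have hmemidx : ∀ x ∈ arreglo, ∃ (k : Nat) (hk : k < S.length), S[k] = x := by
    intro x hx
    exact List.getElem_of_mem (hperm.mem_iff.mpr hx)
  have hpos_inj : ∀ a ∈ arreglo, ∀ b ∈ arreglo, pvPos arreglo a = pvPos arreglo b → a = b := by
    intro a ha b hb hab
    obtain ⟨ka, hka, rfl⟩ := hmemidx a ha
    obtain ⟨kb, hkb, rfl⟩ := hmemidx b hb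
    rw [hposS ka hka, hposS kb hkb] at hab
    subst hab; rfl
  have hpw : arreglo.Pairwise (fun a b => pvPos arreglo a ≠ pvPos arreglo b) := by
    have hne : arreglo.Pairwise (· ≠ ·) := List.nodup_iff_pairwise_ne.mp hnd
    refine (List.pairwise_iff_forall_sublist.mpr ?_)
    intro a b hsub
    have ha : a ∈ arreglo := hsub.subset (by simp)
    have hb : b ∈ arreglo := hsub.subset (by simp)
    have hneq : a ≠ b := List.pairwise_iff_forall_sublist.mp hne hsub
    exact fun h => hneq (hpos_inj a ha b hb h)
  rw [pvLoop_eq_scatter arreglo arreglo (List.replicate arreglo.length none)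
      (by simp) (fun i hi => hi)]
  set R := pvScatter arreglo arreglo (List.replicate arreglo.length (none : Option Int)) with hRdef
  have hRlen : R.length = arreglo.length := by
    rw [hRdef, pvScatter_length]; simp
  have hRk : ∀ (k : Nat) (hk : k < S.length), R[k]? = some (some (S[k])) := by
    intro k hk
    have hmem : S[k] ∈ arreglo := hperm.mem_iff.mp (List.getElem_mem hk)
    have := pvScatter_hit arreglo arreglo (List.replicate arreglo.length none) hpw
      (fun j hj => by simpa using pvPos_lt hj) (S[k]) hmem
    rw [hposS k hk] at this
    exact this
  refine List.ext_getElem? ?_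
  intro k
  rcases Nat.lt_or_ge k S.length with hk | hk
  · rw [List.getElem?_map, hRk k hk]
    simp only [Option.map_some]
    rw [List.getElem?_eq_getElem hk]
    simp
  · rw [List.getElem?_eq_none (l := R.map _) (by simp [hRlen, ← hlenS]; omega),
        List.getElem?_eq_none hk]
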